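-- pv_equiv track=rewrite | github.com/heoseungjun/AlgorithmStudy | algorithm/src/programmers/tired.py | solution
-- ===== SOURCE A (Python) =====
-- from itertools import permutations
--
-- def solution(k, dungeons):
--     answer = 0
--     for order in permutations(dungeons,len(dungeons)) :
--         tmp = k; tired = 0
--         for i in range(len(dungeons)) :
--             if order[i][0] <= tmp :
--                 tmp -= order[i][1]
--                 tired += 1
--         answer = max(answer,tired)
--
--     return answer
-- ===== SOURCE B (Python) =====
-- def solution(k, dungeons):
--     def dfs(stamina, remaining):
--         best = 0
--         for d in remaining:
--             if d[0] <= stamina: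
--                 rest = list(remaining)
--                 rest.remove(d)
--                 best = max(best, 1 + dfs(stamina - d[1], rest))
--         return best
--     return dfs(k, list(dungeons))
-- ===== Notes on version B (the rewrite author's own statement) =====
-- stated objective: alternative
-- what changed: Replaces A's full enumeration of all n! permutations (running the greedy skip-walk on each) with a recursive backtracking DFS that only branches on currently clearable dungeons, removing each chosen dungeon from the remaining list and taking 1 + the best of the rest.
import Mathlib
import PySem

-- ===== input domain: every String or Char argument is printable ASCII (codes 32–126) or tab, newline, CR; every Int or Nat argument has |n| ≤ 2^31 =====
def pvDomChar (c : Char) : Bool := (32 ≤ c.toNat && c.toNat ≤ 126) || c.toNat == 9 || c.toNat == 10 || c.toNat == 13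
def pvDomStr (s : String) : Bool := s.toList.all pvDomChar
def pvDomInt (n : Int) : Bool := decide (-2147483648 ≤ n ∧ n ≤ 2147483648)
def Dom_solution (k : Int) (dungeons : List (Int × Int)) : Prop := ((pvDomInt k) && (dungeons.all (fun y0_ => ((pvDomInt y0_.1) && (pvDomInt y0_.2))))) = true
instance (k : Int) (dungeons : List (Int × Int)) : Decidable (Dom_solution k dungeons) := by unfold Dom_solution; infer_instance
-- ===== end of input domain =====

-- B replaces A's n!-permutation enumeration by a recursive backtracking DFS over
-- the clearable choices from the remaining dungeon list (objective: alternative).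

-- ===== PORT A =====
-- inner loop of A: walk a fixed order with state (tmp, tired); Python's
-- `for i in range(len(dungeons)): order[i]` visits exactly the elements of `order`
-- (len order = len dungeons), so it is ported as a fold over `order`.
def gcountA (k : Int) (order : List (Int × Int)) : Int :=
  (order.foldl (fun (s : Int × Int) d => if d.1 ≤ s.1 then (s.1 - d.2, s.2 + 1) else s) (k, 0)).2

-- `itertools.permutations(dungeons, len(dungeons))` enumerates all permutations;
-- ported via List.permutations (A only takes the max over them).
def solution (k : Int) (dungeons : List (Int × Int)) : Int :=
  dungeons.permutations.foldl (fun answer order => max answer (gcountA k order)) 0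

-- ===== PORT B =====
-- dfs from Source B; the Nat fuel (initially `remaining.length`, decreasing with each
-- `erase`) is only a termination guard for Lean, the computation is Source B's.
-- `rest.remove(d)` removes the first element equal to d, i.e. List.erase.
def dfsB (fuel : Nat) (stamina : Int) (remaining : List (Int × Int)) : Int :=
  match fuel with
  | 0 => 0
  | n + 1 =>
      remaining.foldl
        (fun best d =>
          if d.1 ≤ stamina then max best (1 + dfsB n (stamina - d.2) (remaining.erase d))
          else best) 0

def solution_alt (k : Int) (dungeons : List (Int × Int)) : Int :=
  dfsB dungeons.length k dungeons

-- ===== PRECONDITION & SPEC =====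
def Spec_solution (k : Int) (dungeons : List (Int × Int)) (out : Int) : Prop := out = solution_alt k dungeons
instance (k : Int) (dungeons : List (Int × Int)) (out : Int) : Decidable (Spec_solution k dungeons out) := by unfold Spec_solution; infer_instance

-- ===== CLAIM (what is proved, stated in full; the proofs are below) =====
def Claim_equal_solution : Prop := ∀ (k : Int) (dungeons : List (Int × Int)), Dom_solution k dungeons → Spec_solution k dungeons (solution k dungeons)

-- ===== LEMMAS AND PROOFS =====

theorem dfsB_succ (m : Nat) (k : Int) (l : List (Int × Int)) :
    dfsB (m + 1) k l =
      l.foldl (fun best d =>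
        if d.1 ≤ k then max best (1 + dfsB m (k - d.2) (l.erase d)) else best) 0 := rfl

-- generic facts about the conditional-max fold shape used by dfsB
theorem condfold_ge_init {α : Type} (c : α → Prop) [DecidablePred c] (h : α → Int) :
    ∀ (L : List α) (init : Int),
      init ≤ L.foldl (fun acc d => if c d then max acc (h d) else acc) init := by
  intro L
  induction L with
  | nil => intro init; simp
  | cons a L ih =>
      intro init
      refine le_trans ?_ (ih (if c a then max init (h a) else init))
      split <;> simp

theorem condfold_elem {α : Type} (c : α → Prop) [DecidablePred c] (h : α → Int)
    {L : List α} {d : α} (hd : d ∈ L) (hc : c d) (init : Int) :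
    h d ≤ L.foldl (fun acc e => if c e then max acc (h e) else acc) init := by
  induction L generalizing init with
  | nil => cases hd
  | cons a L ih =>
      rcases List.mem_cons.1 hd with h1 | h1
      · subst h1
        refine le_trans ?_ (condfold_ge_init c h L _)
        simp [hc]
      · exact ih h1 _

theorem condfold_ub {α : Type} (c : α → Prop) [DecidablePred c] (h : α → Int)
    {L : List α} {M : Int} (hM : ∀ d ∈ L, c d → h d ≤ M) :
    ∀ init, init ≤ M →
      L.foldl (fun acc d => if c d then max acc (h d) else acc) init ≤ M := by
  induction L with
  | nil => intro init hi; simpa using hi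
  | cons a L ih =>
      intro init hi
      simp only [List.foldl_cons]
      refine ih (fun d hd hc => hM d (List.mem_cons_of_mem _ hd) hc) _ ?_
      by_cases hca : c a
      · simpa [hca] using max_le hi (hM a List.mem_cons_self hca)
      · simpa [hca] using hi

theorem condfold_cases {α : Type} (c : α → Prop) [DecidablePred c] (h : α → Int) :
    ∀ (L : List α) (init : Int),
      L.foldl (fun acc d => if c d then max acc (h d) else acc) init = init ∨
      ∃ d ∈ L, c d ∧
        L.foldl (fun acc d => if c d then max acc (h d) else acc) init = h d := by
  intro L
  induction L with
  | nil => intro init; left; simp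
  | cons a L ih =>
      intro init
      rcases ih (if c a then max init (h a) else init) with h1 | ⟨d, hd, hc, h1⟩
      · by_cases hca : c a
        · rcases max_choice init (h a) with h2 | h2
          · left; simpa [hca, h2] using h1
          · right; exact ⟨a, List.mem_cons_self, hca, by simpa [hca, h2] using h1⟩
        · left; simpa [hca] using h1
      · right; exact ⟨d, List.mem_cons_of_mem _ hd, hc, by simpa using h1⟩

-- plain max-fold (A's outer loop)
theorem maxfold_ge_init {α : Type} (g : α → Int) :
    ∀ (L : List α) (init : Int), init ≤ L.foldl (fun acc p => max acc (g p)) init := by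
  intro L
  induction L with
  | nil => intro init; simp
  | cons a L ih =>
      intro init
      exact le_trans (le_max_left _ _) (ih (max init (g a)))

theorem maxfold_elem {α : Type} (g : α → Int) {L : List α} {p : α} (hp : p ∈ L) (init : Int) :
    g p ≤ L.foldl (fun acc q => max acc (g q)) init := by
  induction L generalizing init with
  | nil => cases hp
  | cons a L ih =>
      rcases List.mem_cons.1 hp with h1 | h1
      · subst h1
        exact le_trans (le_max_right _ _) (maxfold_ge_init g L _)
      · exact ih h1 _

theorem maxfold_ub {α : Type} (g : α → Int) {L : List α} {M : Int}
    (hM : ∀ p ∈ L, g p ≤ M) : ∀ init, init ≤ M →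
    L.foldl (fun acc p => max acc (g p)) init ≤ M := by
  induction L with
  | nil => intro init hi; simpa using hi
  | cons a L ih =>
      intro init hi
      exact ih (fun p hp => hM p (List.mem_cons_of_mem _ hp)) _
        (max_le hi (hM a List.mem_cons_self))

theorem dfsB_nonneg : ∀ (n : Nat) (k : Int) (l : List (Int × Int)), 0 ≤ dfsB n k l := by
  intro n k l
  cases n with
  | zero => simp [dfsB]
  | succ m =>
      rw [dfsB_succ]
      exact condfold_ge_init (fun d => d.1 ≤ k)
        (fun d => 1 + dfsB m (k - d.2) (l.erase d)) l 0

-- state-shift lemma for A's inner fold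
theorem gA_shift : ∀ (p : List (Int × Int)) (t c : Int),
    (p.foldl (fun (s : Int × Int) d => if d.1 ≤ s.1 then (s.1 - d.2, s.2 + 1) else s) (t, c)).2
      = c + (p.foldl (fun (s : Int × Int) d => if d.1 ≤ s.1 then (s.1 - d.2, s.2 + 1) else s) (t, 0)).2 := by
  intro p
  induction p with
  | nil => intro t c; simp
  | cons a p ih =>
      intro t c
      by_cases h : a.1 ≤ t
      · simp only [List.foldl_cons, h, if_pos]
        rw [ih (t - a.2) (c + 1), ih (t - a.2) (0 + 1)]
        ring
      · simp only [List.foldl_cons, h, if_neg, not_false_iff]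
        exact ih t c

theorem gcountA_nonneg (k : Int) (p : List (Int × Int)) : 0 ≤ gcountA k p := by
  induction p generalizing k with
  | nil => simp [gcountA]
  | cons a p ih =>
      unfold gcountA
      by_cases h : a.1 ≤ k
      · simp only [List.foldl_cons, h, if_pos]
        rw [gA_shift]
        have := ih (k - a.2)
        unfold gcountA at this
        omega
      · simp only [List.foldl_cons, h, if_neg, not_false_iff]
        exact ih k

theorem gcountA_cons_le {k : Int} {x : Int × Int} (p : List (Int × Int)) (h : x.1 ≤ k) :
    gcountA k (x :: p) = 1 + gcountA (k - x.2) p := by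
  unfold gcountA
  simp only [List.foldl_cons, h, if_pos]
  rw [gA_shift]
  ring

theorem gcountA_cons_gt {k : Int} {x : Int × Int} (p : List (Int × Int)) (h : ¬ x.1 ≤ k) :
    gcountA k (x :: p) = gcountA k p := by
  simp [gcountA, h]

-- erase-monotonicity across one unit of fuel
theorem dfsB_erase_le : ∀ (n : Nat) (k : Int) (x : Int × Int) (l : List (Int × Int)),
    dfsB n k (l.erase x) ≤ dfsB (n + 1) k l := by
  intro n
  induction n with
  | zero => intro k x l; exact dfsB_nonneg _ _ _
  | succ m ih =>
      intro k x l
      rw [dfsB_succ]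
      refine condfold_ub (fun d : Int × Int => d.1 ≤ k)
        (fun d : Int × Int => 1 + dfsB m (k - d.2) ((l.erase x).erase d)) ?_ 0 (dfsB_nonneg _ _ _)
      intro d hd hc
      have hdl : d ∈ l := List.mem_of_mem_erase hd
      have h1 : (l.erase x).erase d = (l.erase d).erase x := List.erase_comm ..
      calc 1 + dfsB m (k - d.2) ((l.erase x).erase d)
          = 1 + dfsB m (k - d.2) ((l.erase d).erase x) := by rw [h1]
        _ ≤ 1 + dfsB (m + 1) (k - d.2) (l.erase d) := by
              have := ih (k - d.2) x (l.erase d); omega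
        _ ≤ dfsB (m + 2) k l :=
              condfold_elem (fun d : Int × Int => d.1 ≤ k)
                (fun d : Int × Int => 1 + dfsB (m + 1) (k - d.2) (l.erase d)) hdl hc 0

-- every permutation's greedy count is at most the DFS value
theorem gcountA_le_dfsB : ∀ (n : Nat) (p l : List (Int × Int)) (k : Int),
    p.Perm l → l.length ≤ n → gcountA k p ≤ dfsB n k l := by
  intro n
  induction n with
  | zero =>
      intro p l k hp hl
      have hl0 : l = [] := by cases l <;> simp_all
      subst hl0
      have : p = [] := by have := hp.length_eq; cases p <;> simp_all
      subst this
      simp [gcountA, dfsB]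
  | succ m ih =>
      intro p l k hp hl
      cases p with
      | nil =>
          have : l = [] := by have := hp.length_eq; cases l <;> simp_all
          subst this; simp [gcountA, dfsB]
      | cons x rest =>
          have hx : x ∈ l := hp.subset List.mem_cons_self
          have hrest : rest.Perm (l.erase x) :=
            (hp.trans (List.perm_cons_erase hx)).cons_inv
          have hlen : (l.erase x).length ≤ m := by
            have := List.length_erase_of_mem hx
            omega
          by_cases hc : x.1 ≤ k
          · rw [gcountA_cons_le rest hc]
            calc 1 + gcountA (k - x.2) rest
                ≤ 1 + dfsB m (k - x.2) (l.erase x) := by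
                  have := ih rest (l.erase x) (k - x.2) hrest hlen; omega
              _ ≤ dfsB (m + 1) k l :=
                  condfold_elem (fun d : Int × Int => d.1 ≤ k)
                    (fun d : Int × Int => 1 + dfsB m (k - d.2) (l.erase d)) hx hc 0
          · rw [gcountA_cons_gt rest hc]
            exact le_trans (ih rest (l.erase x) k hrest hlen) (dfsB_erase_le m k x l)

-- the DFS value is realised by some permutation
theorem dfsB_realised : ∀ (n : Nat) (l : List (Int × Int)) (k : Int), l.length ≤ n →
    ∃ p, p.Perm l ∧ dfsB n k l ≤ gcountA k p := by
  intro n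
  induction n with
  | zero =>
      intro l k hl
      exact ⟨l, List.Perm.refl l, by simpa [dfsB] using gcountA_nonneg k l⟩
  | succ m ih =>
      intro l k hl
      rcases condfold_cases (fun d : Int × Int => d.1 ≤ k)
          (fun d : Int × Int => 1 + dfsB m (k - d.2) (l.erase d)) l 0 with h1 | ⟨d, hd, hc, h1⟩
      · refine ⟨l, List.Perm.refl l, ?_⟩
        rw [dfsB_succ, h1]
        exact gcountA_nonneg k l
      · have hlen : (l.erase d).length ≤ m := by
          have := List.length_erase_of_mem hd; omega
        rcases ih (l.erase d) (k - d.2) hlen with ⟨p', hp', hle⟩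
        refine ⟨d :: p', (hp'.cons d).trans (List.perm_cons_erase hd).symm, ?_⟩
        rw [gcountA_cons_le p' hc, dfsB_succ, h1]
        omega

theorem main_eq (k : Int) (l : List (Int × Int)) : solution k l = solution_alt k l := by
  unfold solution solution_alt
  apply le_antisymm
  · refine maxfold_ub (fun p => gcountA k p) ?_ 0 (dfsB_nonneg _ _ _)
    intro p hp
    exact gcountA_le_dfsB l.length p l k (List.mem_permutations.1 hp) le_rfl
  · rcases dfsB_realised l.length l k le_rfl with ⟨p, hp, hle⟩
    exact hle.trans (maxfold_elem (fun q => gcountA k q) (List.mem_permutations.2 hp) 0)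

-- ===== VERDICT (by name: the statement is the Claim_ definition above) =====
theorem solution_spec : Claim_equal_solution := by
  intro k dungeons _
  show solution k dungeons = solution_alt k dungeons
  exact main_eq k dungeons
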